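-- pv_equiv track=rewrite | github.com/remowxdx/AoC-2020 | aoc20.py | pixels_to_num
-- ===== SOURCE A (Python) =====
-- def pixels_to_num(pixels):
--     num = 0
--     rnum = 0
--     start = 1 << (len(pixels) - 1)
--     for i, p in enumerate(pixels):
--         if p == '#':
--             bit = 1
--         else:
--             bit = 0
--         num = (num << 1) + bit
--         rnum = (rnum >> 1) + start * bit
--     if num == rnum:
--         raise Exception('Argh! Palindromic border!')
--     return num , rnum
-- ===== SOURCE B (Python) =====
-- def pixels_to_num(pixels):
--     s = ''.join('1' if p == '#' else '0' for p in pixels)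
--     num = int(s, 2)
--     rnum = int(s[::-1], 2)
--     if num == rnum:
--         raise Exception('Argh! Palindromic border!')
--     return num, rnum
-- ===== Notes on version B (the rewrite author's own statement) =====
-- stated objective: simpler
-- what changed: Builds the binary string once and parses it and its reversal with int(s,2), replacing the single-pass dual shift/add accumulator loop with start = 1 << (len-1).
-- outside the precondition, e.g. on pixels_to_num('#'): A raises Exception, B raises Exception
import Mathlib
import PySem

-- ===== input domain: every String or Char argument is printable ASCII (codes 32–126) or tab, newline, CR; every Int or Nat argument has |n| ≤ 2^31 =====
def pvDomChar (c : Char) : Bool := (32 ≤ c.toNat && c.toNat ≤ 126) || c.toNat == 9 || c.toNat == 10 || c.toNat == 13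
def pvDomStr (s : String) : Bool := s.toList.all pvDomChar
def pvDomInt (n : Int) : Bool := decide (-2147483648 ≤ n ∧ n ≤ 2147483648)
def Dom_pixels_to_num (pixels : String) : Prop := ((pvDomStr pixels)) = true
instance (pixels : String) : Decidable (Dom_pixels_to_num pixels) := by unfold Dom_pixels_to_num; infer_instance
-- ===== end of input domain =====

-- B parses the binary string and its reversal instead of A's dual shift/add accumulator loop (simpler); return value only — both Pythons raise outside Pre_.

-- ===== PORT A =====
def pixels_to_num (pixels : String) : Int × Int :=
  let start : Int := 2 ^ (pixels.toList.length - 1)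
  let st := pixels.toList.foldl
    (fun (st : Int × Int) (p : Char) =>
      let bit : Int := if p = '#' then 1 else 0
      (st.1 * 2 + bit, PySem.Int.floordiv st.2 2 + start * bit))
    (0, 0)
  st

-- ===== PORT B =====
-- int(s, 2) on a '0'/'1' string: left fold accumulating acc*2 + digit
def pvParseBin (l : List Char) : Int :=
  l.foldl (fun a c => a * 2 + (if c = '1' then 1 else 0)) 0

def pixels_to_num_alt (pixels : String) : Int × Int :=
  let s := pixels.toList.map (fun p => if p = '#' then '1' else '0')
  (pvParseBin s, pvParseBin s.reverse)

-- ===== PRECONDITION & SPEC =====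
-- Pre_ excludes exactly the inputs where Python A raises: the empty string (ValueError from 1 << -1)
-- and palindromic '#'-patterns (A's explicit 'Argh! Palindromic border!' Exception); B raises there too.
def Pre_pixels_to_num (pixels : String) : Prop :=
  pixels.toList ≠ [] ∧
  pixels.toList.map (fun p => p == '#') ≠ (pixels.toList.map (fun p => p == '#')).reverse
instance (pixels : String) : Decidable (Pre_pixels_to_num pixels) := by
  unfold Pre_pixels_to_num; infer_instance
def pvWitness_pixels_to_num : String := "#.."
def Spec_pixels_to_num (pixels : String) (out : Int × Int) : Prop := out = pixels_to_num_alt pixels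
instance (pixels : String) (out : Int × Int) : Decidable (Spec_pixels_to_num pixels out) := by unfold Spec_pixels_to_num; infer_instance

-- ===== CLAIM (what is proved, stated in full; the proofs are below) =====
def Claim_equal_pixels_to_num : Prop := ∀ (pixels : String), Dom_pixels_to_num pixels → Pre_pixels_to_num pixels → Spec_pixels_to_num pixels (pixels_to_num pixels)

-- ===== LEMMAS AND PROOFS =====

def pvBit (p : Char) : Int := if p = '#' then 1 else 0

-- value of the reversed bit string, recursively
def pvRevVal : List Char → Int
  | [] => 0
  | p :: tl => pvBit p + 2 * pvRevVal tl

theorem pvParseBin_gen (l : List Char) (a : Int) :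
    l.foldl (fun a c => a * 2 + (if c = '1' then 1 else 0)) a
      = a * 2 ^ l.length + pvParseBin l := by
  induction l generalizing a with
  | nil => simp [pvParseBin]
  | cons c tl ih =>
    simp only [List.foldl_cons, pvParseBin, List.length_cons]
    rw [ih, ih ((0:Int) * 2 + _)]
    ring

theorem pvRevVal_eq_parse_rev (l : List Char) :
    pvRevVal l = pvParseBin (l.map (fun p => if p = '#' then '1' else '0')).reverse := by
  induction l with
  | nil => simp [pvRevVal, pvParseBin]
  | cons p tl ih =>
    simp only [pvRevVal, List.map_cons, List.reverse_cons, pvParseBin, List.foldl_append,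
      List.foldl_cons, List.foldl_nil]
    rw [ih]
    have := pvParseBin_gen ((tl.map (fun p => if p = '#' then '1' else '0')).reverse)
    simp only [pvParseBin] at *
    rw [this]
    have hb : (if (if p = '#' then '1' else '0') = '1' then (1:Int) else 0) = pvBit p := by
      by_cases h : p = '#' <;> simp [h, pvBit]
    rw [hb]; ring

theorem pvNum_fold (l : List Char) (a : Int) :
    l.foldl (fun n c => n * 2 + pvBit c) a
      = (l.map (fun p => if p = '#' then '1' else '0')).foldl
          (fun a c => a * 2 + (if c = '1' then 1 else 0)) a := by
  induction l generalizing a with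
  | nil => rfl
  | cons p tl ih =>
    simp only [List.foldl_cons, List.map_cons]
    rw [ih]
    by_cases h : p = '#' <;> simp [h, pvBit]

theorem pvFloordiv_two_mul (m : Int) : PySem.Int.floordiv (2 * m) 2 = m := by
  rw [PySem.Int.floordiv_eq_ediv_of_pos (by omega)]
  omega

-- the rnum accumulator: starting from 2^len * m with start = 2^(len-1) * t yields m + t * pvRevVal l
theorem pvRnum_key : ∀ (l : List Char) (start t m : Int),
    start = 2 ^ (l.length - 1) * t →
    l.foldl (fun r c => PySem.Int.floordiv r 2 + start * pvBit c) (2 ^ l.length * m)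
      = m + t * pvRevVal l := by
  intro l
  induction l with
  | nil => intro start t m h; simp [pvRevVal]
  | cons p tl ih =>
    intro start t m h
    simp only [List.foldl_cons, List.length_cons] at *
    have hlen : (tl.length + 1 - 1) = tl.length := by omega
    rw [hlen] at h
    have h1 : (2:Int) ^ (tl.length + 1) * m = 2 * (2 ^ tl.length * m) := by ring
    rw [h1, pvFloordiv_two_mul, h]
    have h2 : (2:Int) ^ tl.length * m + 2 ^ tl.length * t * pvBit p
        = 2 ^ tl.length * (m + t * pvBit p) := by ring
    rw [h2]
    cases tl with
    | nil => simp [pvRevVal]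
    | cons q tl2 =>
      have hth := ih (2 ^ ((q :: tl2).length - 1) * (2 * t)) (2 * t) (m + t * pvBit p) rfl
      simp only [List.length_cons, Nat.add_sub_cancel] at hth ⊢
      have he : (2:Int) ^ tl2.length * (2 * t) = 2 ^ (tl2.length + 1) * t := by ring
      rw [he] at hth
      rw [hth]
      simp only [pvRevVal]
      ring

theorem pvPair_fold (l : List Char) (f g : Int → Char → Int) (a b : Int) :
    l.foldl (fun (st : Int × Int) c => (f st.1 c, g st.2 c)) (a, b)
      = (l.foldl f a, l.foldl g b) := by
  induction l generalizing a b with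
  | nil => rfl
  | cons c tl ih => simp only [List.foldl_cons]; exact ih _ _

-- ===== VERDICT (by name: the statement is the Claim_ definition above) =====
theorem pixels_to_num_spec : Claim_equal_pixels_to_num := by
  intro pixels _ _
  unfold Spec_pixels_to_num pixels_to_num pixels_to_num_alt
  set l := pixels.toList with hl
  simp only
  rw [pvPair_fold l (fun n c => n * 2 + (if c = '#' then (1:Int) else 0))
      (fun r c => PySem.Int.floordiv r 2 + 2 ^ (l.length - 1) * (if c = '#' then (1:Int) else 0)) 0 0]
  congr 1
  · have := pvNum_fold l 0
    simp only [pvBit] at this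
    rw [this]; rfl
  · have := pvRnum_key l (2 ^ (l.length - 1) * 1) 1 0 rfl
    simp only [pvBit, mul_one] at this
    have h0 : (2:Int) ^ l.length * 0 = 0 := by ring
    rw [h0] at this
    rw [this, ← pvRevVal_eq_parse_rev]
    ring
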